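-- pv_equiv track=rewrite | github.com/promeosenergies-svg/promeos-poc | backend/services/schedule_detection_service.py | _slots_to_intervals
-- ===== SOURCE A (Python) =====
-- GAP_FILL_MINUTES = 30
--
-- MIN_INTERVAL_MINUTES = 30
--
-- def _minutes_to_hhmm(m: int) -> str:
--     """Convert total minutes to HH:MM string."""
--     h = min(23, m // 60)
--     mm = m % 60
--     return f"{h:02d}:{mm:02d}"
--
-- def _slots_to_intervals(active_slots: list, step_min: int) -> list:
--     """Convert list of (slot_minute, is_active, activity) to intervals with post-processing."""
--     if not active_slots:
--         return []
--
--     # Extract raw intervals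
--     raw_intervals = []
--     current_start = None
--     for slot, is_active, _ in active_slots:
--         if is_active and current_start is None:
--             current_start = slot
--         elif not is_active and current_start is not None:
--             raw_intervals.append({"start": current_start, "end": slot})
--             current_start = None
--     if current_start is not None:
--         # Close at end of day
--         last_slot = active_slots[-1][0]
--         raw_intervals.append({"start": current_start, "end": min(last_slot + step_min, 24 * 60 - 1)})
--
--     if not raw_intervals:
--         return []
--
--     # Post-process: fill gaps <= 30 min
--     merged = [raw_intervals[0].copy()]
--     for iv in raw_intervals[1:]:
--         gap = iv["start"] - merged[-1]["end"]
--         if gap <= GAP_FILL_MINUTES: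
--             merged[-1]["end"] = iv["end"]
--         else:
--             merged.append(iv.copy())
--
--     # Post-process: drop intervals < 30 min
--     merged = [iv for iv in merged if (iv["end"] - iv["start"]) >= MIN_INTERVAL_MINUTES]
--
--     # Cap at 23:59, no midnight crossing (already guaranteed by construction)
--     result = []
--     for iv in merged:
--         start_m = max(0, iv["start"])
--         end_m = min(24 * 60 - 1, iv["end"])
--         if start_m < end_m:
--             result.append({
--                 "start": _minutes_to_hhmm(start_m),
--                 "end": _minutes_to_hhmm(end_m),
--             })
--
--     return result
-- ===== SOURCE B (Python) =====
-- # Single streaming pass: fuse extraction, gap-merge, min-length drop and formatting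
-- # into one loop with a 'pending' merged interval.
--
-- GAP_FILL_MINUTES = 30
--
-- MIN_INTERVAL_MINUTES = 30
--
--
-- def _minutes_to_hhmm(m: int) -> str:
--     """Convert total minutes to HH:MM string."""
--     h = min(23, m // 60)
--     mm = m % 60
--     return f"{h:02d}:{mm:02d}"
--
--
-- def _flush(pending, result):
--     """Emit the pending merged interval if long enough, capped to the day."""
--     s, e = pending
--     if e - s >= MIN_INTERVAL_MINUTES:
--         sm = max(0, s)
--         em = min(24 * 60 - 1, e)
--         if sm < em:
--             result.append({"start": _minutes_to_hhmm(sm), "end": _minutes_to_hhmm(em)})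
--     return result
--
--
-- def _absorb(s, e, pending, result):
--     """Merge run [s, e) into pending, flushing pending first when the gap is too big."""
--     if pending is not None:
--         if s - pending[1] <= GAP_FILL_MINUTES:
--             return (pending[0], e), result
--         result = _flush(pending, result)
--     return (s, e), result
--
--
-- def _slots_to_intervals(active_slots: list, step_min: int) -> list:
--     if not active_slots:
--         return []
--     result = []
--     run_start = None
--     pending = None
--     for slot, is_active, _ in active_slots:
--         if is_active:
--             if run_start is None:
--                 run_start = slot
--         elif run_start is not None:
--             pending, result = _absorb(run_start, slot, pending, result)
--             run_start = None
--     if run_start is not None: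
--         day_end = min(active_slots[-1][0] + step_min, 24 * 60 - 1)
--         pending, result = _absorb(run_start, day_end, pending, result)
--     if pending is not None:
--         result = _flush(pending, result)
--     return result
-- ===== Notes on version B (the rewrite author's own statement) =====
-- stated objective: simpler
-- what changed: Replaces A's four sequential passes (raw-interval extraction, gap-merge, short-interval filter, cap-and-format) with a single streaming loop over active_slots that keeps one pending merged interval and flushes it (filter+cap+format) as soon as it cannot be extended.
import Mathlib
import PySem

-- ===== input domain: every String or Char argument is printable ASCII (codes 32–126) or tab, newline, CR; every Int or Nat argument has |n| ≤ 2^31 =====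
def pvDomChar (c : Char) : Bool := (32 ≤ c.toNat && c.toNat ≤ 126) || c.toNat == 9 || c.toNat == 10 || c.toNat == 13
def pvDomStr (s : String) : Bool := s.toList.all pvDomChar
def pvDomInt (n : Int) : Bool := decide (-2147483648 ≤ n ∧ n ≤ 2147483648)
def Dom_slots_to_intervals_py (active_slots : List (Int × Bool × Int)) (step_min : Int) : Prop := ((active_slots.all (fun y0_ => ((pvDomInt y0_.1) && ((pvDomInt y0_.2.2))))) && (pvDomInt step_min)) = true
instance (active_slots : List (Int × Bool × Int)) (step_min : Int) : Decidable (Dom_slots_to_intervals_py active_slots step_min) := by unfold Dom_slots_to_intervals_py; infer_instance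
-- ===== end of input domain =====

-- B fuses A's four passes (extract raw runs / gap-merge / drop short / cap+format)
-- into one streaming loop over active_slots with a single 'pending' merged interval
-- (objective: simpler one-pass decomposition; same asymptotic cost).

-- ===== PORT A =====
-- f"{n:02d}" (zero-pad to width 2); exact for the values reached here (0 ≤ n ≤ 59)
def pvPad2 (n : Int) : String :=
  let s := PySem.Int.toStr n
  if s.toList.length < 2 then "0" ++ s else s

-- _minutes_to_hhmm
def pvHhmm (m : Int) : String :=
  let h := min 23 (PySem.Int.floordiv m 60)
  let mm := PySem.Int.mod m 60
  pvPad2 h ++ ":" ++ pvPad2 mm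

-- first pass of A: the for-loop extracting raw intervals, returning (raw_intervals, current_start)
def pvExtractA : List (Int × Bool × Int) → Option Int → List (Int × Int) × Option Int
  | [], cs => ([], cs)
  | (slot, is_active, _) :: rest, cs =>
    if is_active then
      match cs with
      | none => pvExtractA rest (some slot)
      | some _ => pvExtractA rest cs
    else
      match cs with
      | some s =>
        let (r, c) := pvExtractA rest none
        ((s, slot) :: r, c)
      | none => pvExtractA rest none

-- second pass of A: gap-merge; 'merged' is acc ++ [cur] (cur = mutable merged[-1])
def pvMergeA (acc : List (Int × Int)) (cur : Int × Int) : List (Int × Int) → List (Int × Int)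
  | [] => acc ++ [cur]
  | iv :: rest =>
    if iv.1 - cur.2 ≤ 30 then pvMergeA acc (cur.1, iv.2) rest
    else pvMergeA (acc ++ [cur]) iv rest

-- fourth pass of A: cap and format
def pvCapStep (acc : List (List (String × String))) (iv : Int × Int) : List (List (String × String)) :=
  let start_m := max 0 iv.1
  let end_m := min (24 * 60 - 1) iv.2
  if start_m < end_m then acc ++ [[("start", pvHhmm start_m), ("end", pvHhmm end_m)]] else acc

def slots_to_intervals_py (active_slots : List (Int × Bool × Int)) (step_min : Int) : List (List (String × String)) :=
  if active_slots = [] then []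
  else
    let (raw0, cs) := pvExtractA active_slots none
    let raw :=
      match cs with
      | some s =>
        let last_slot := (active_slots.getLast! ).1
        raw0 ++ [(s, min (last_slot + step_min) (24 * 60 - 1))]
      | none => raw0
    match raw with
    | [] => []
    | r :: rs =>
      let merged := pvMergeA [] r rs
      let merged2 := merged.filter (fun iv => 30 ≤ iv.2 - iv.1)
      merged2.foldl pvCapStep []

-- ===== PORT B =====
-- _flush: emit pending if long enough, capped to the day
def pvFlushB (pending : Int × Int) (result : List (List (String × String))) : List (List (String × String)) :=
  if pending.2 - pending.1 ≥ 30 then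
    let sm := max 0 pending.1
    let em := min (24 * 60 - 1) pending.2
    if sm < em then result ++ [[("start", pvHhmm sm), ("end", pvHhmm em)]] else result
  else result

-- _absorb: merge run [s,e) into pending, flushing pending first when the gap is too big
def pvAbsorbB (s e : Int) (pending : Option (Int × Int)) (result : List (List (String × String))) :
    Option (Int × Int) × List (List (String × String)) :=
  match pending with
  | some p =>
    if s - p.2 ≤ 30 then (some (p.1, e), result)
    else (some (s, e), pvFlushB p result)
  | none => (some (s, e), result)

-- the single streaming loop: state (run_start, pending, result)
def pvGoB : List (Int × Bool × Int) → Option Int → Option (Int × Int) → List (List (String × String)) →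
    Option Int × Option (Int × Int) × List (List (String × String))
  | [], run_start, pending, result => (run_start, pending, result)
  | (slot, is_active, _) :: rest, run_start, pending, result =>
    if is_active then
      match run_start with
      | none => pvGoB rest (some slot) pending result
      | some _ => pvGoB rest run_start pending result
    else
      match run_start with
      | some s =>
        let (p, r) := pvAbsorbB s slot pending result
        pvGoB rest none p r
      | none => pvGoB rest none pending result

def slots_to_intervals_py_alt (active_slots : List (Int × Bool × Int)) (step_min : Int) : List (List (String × String)) :=
  if active_slots = [] then []
  else
    let (run_start, pending, result) := pvGoB active_slots none none []
    let (pending, result) :=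
      match run_start with
      | some s =>
        let day_end := min ((active_slots.getLast!).1 + step_min) (24 * 60 - 1)
        pvAbsorbB s day_end pending result
      | none => (pending, result)
    match pending with
    | some p => pvFlushB p result
    | none => result

-- ===== PRECONDITION & SPEC =====
def Spec_slots_to_intervals_py (active_slots : List (Int × Bool × Int)) (step_min : Int) (out : List (List (String × String))) : Prop := out = slots_to_intervals_py_alt active_slots step_min
instance (active_slots : List (Int × Bool × Int)) (step_min : Int) (out : List (List (String × String))) : Decidable (Spec_slots_to_intervals_py active_slots step_min out) := by unfold Spec_slots_to_intervals_py; infer_instance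

-- ===== CLAIM (what is proved, stated in full; the proofs are below) =====
def Claim_equal_slots_to_intervals_py : Prop := ∀ (active_slots : List (Int × Bool × Int)) (step_min : Int), Dom_slots_to_intervals_py active_slots step_min → Spec_slots_to_intervals_py active_slots step_min (slots_to_intervals_py active_slots step_min)

-- ===== LEMMAS AND PROOFS =====

-- processing a list of raw intervals through B's absorb, as a fold
def pvProc (st : Option (Int × Int) × List (List (String × String))) (l : List (Int × Int)) :
    Option (Int × Int) × List (List (String × String)) :=
  l.foldl (fun st iv => pvAbsorbB iv.1 iv.2 st.1 st.2) st

-- final flush of B, as a function of the state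
def pvFin (st : Option (Int × Int) × List (List (String × String))) : List (List (String × String)) :=
  match st.1 with
  | some p => pvFlushB p st.2
  | none => st.2

theorem pvMergeA_acc (acc : List (Int × Int)) (cur : Int × Int) (l : List (Int × Int)) :
    pvMergeA acc cur l = acc ++ pvMergeA [] cur l := by
  induction l generalizing acc cur with
  | nil => simp [pvMergeA]
  | cons iv rest ih =>
    simp only [pvMergeA]
    split_ifs with h
    · exact ih acc _
    · simp only [List.nil_append]
      rw [ih (acc ++ [cur]) iv, ih [cur] iv]; simp

-- A's filter+format pass equals a single fold with a flush condition
theorem pvFilterFold (l : List (Int × Int)) (b : List (List (String × String))) :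
    (l.filter (fun iv => 30 ≤ iv.2 - iv.1)).foldl pvCapStep b = l.foldl (fun a iv => pvFlushB iv a) b := by
  induction l generalizing b with
  | nil => rfl
  | cons iv rest ih =>
    by_cases h : (30 : Int) ≤ iv.2 - iv.1
    · simp only [List.filter_cons, List.foldl_cons]
      rw [if_pos (by simpa using h)]
      simp only [List.foldl_cons]
      rw [ih]
      congr 1
      simp [pvFlushB, pvCapStep, ge_iff_le, h]
    · simp only [List.filter_cons, List.foldl_cons]
      rw [if_neg (by simpa using h)]
      rw [ih]
      congr 1
      simp [pvFlushB, ge_iff_le, h]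

-- core: B's streaming merge+flush over raw intervals equals A's merge then fold-flush
theorem pvCore (raws : List (Int × Int)) (cur : Int × Int) (b : List (List (String × String))) :
    pvFin (pvProc (some cur, b) raws) = (pvMergeA [] cur raws).foldl (fun a iv => pvFlushB iv a) b := by
  induction raws generalizing cur b with
  | nil => simp [pvProc, pvFin, pvMergeA]
  | cons iv rest ih =>
    simp only [pvProc, List.foldl_cons, pvMergeA, pvAbsorbB]
    split_ifs with h
    · exact ih (cur.1, iv.2) b
    · simp only [List.nil_append]
      rw [pvMergeA_acc [cur] iv rest]
      simp only [List.cons_append, List.nil_append, List.foldl_cons]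
      exact ih iv (pvFlushB cur b)

-- the streaming loop equals A's extraction followed by pvProc
theorem pvFuse (slots : List (Int × Bool × Int)) (cs : Option Int)
    (pending : Option (Int × Int)) (result : List (List (String × String))) :
    pvGoB slots cs pending result =
      ((pvExtractA slots cs).2, pvProc (pending, result) (pvExtractA slots cs).1) := by
  induction slots generalizing cs pending result with
  | nil => simp [pvGoB, pvExtractA, pvProc]
  | cons t rest ih =>
    obtain ⟨slot, is_active, act⟩ := t
    simp only [pvGoB, pvExtractA]
    split_ifs with h
    · cases cs with
      | none => exact ih (some slot) pending result
      | some s => exact ih (some s) pending result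
    · cases cs with
      | some s =>
        simp only [pvProc, List.foldl_cons]
        rw [ih none (pvAbsorbB s slot pending result).1 (pvAbsorbB s slot pending result).2]
        rfl
      | none => exact ih none pending result

-- running pvProc on an appended closing interval
theorem pvProc_append (st : Option (Int × Int) × List (List (String × String)))
    (l : List (Int × Int)) (iv : Int × Int) :
    pvProc st (l ++ [iv]) = pvAbsorbB iv.1 iv.2 (pvProc st l).1 (pvProc st l).2 := by
  simp [pvProc, List.foldl_append]

-- starting from pending = none on a nonempty raw list
theorem pvProc_none (r : Int × Int) (rs : List (Int × Int)) (b : List (List (String × String))) :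
    pvProc (none, b) (r :: rs) = pvProc (some r, b) rs := by
  simp [pvProc, pvAbsorbB]

-- ===== VERDICT (by name: the statement is the Claim_ definition above) =====
theorem slots_to_intervals_py_spec : Claim_equal_slots_to_intervals_py := by
  intro slots step _
  show slots_to_intervals_py slots step = slots_to_intervals_py_alt slots step
  by_cases hs : slots = []
  · simp [slots_to_intervals_py, slots_to_intervals_py_alt, hs]
  · simp only [slots_to_intervals_py, slots_to_intervals_py_alt, if_neg hs]
    rw [pvFuse slots none none []]
    set ex := pvExtractA slots none with hex
    obtain ⟨raw0, cs⟩ := ex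
    cases cs with
    | none =>
      simp only
      cases raw0 with
      | nil => simp [pvProc]
      | cons r rs =>
        rw [pvProc_none]
        show List.foldl pvCapStep []
            (List.filter (fun iv => decide (30 ≤ iv.2 - iv.1)) (pvMergeA [] r rs)) =
          pvFin (pvProc (some r, []) rs)
        rw [pvCore]
        exact pvFilterFold _ _
    | some s =>
      simp only
      cases raw0 with
      | nil =>
        simp only [List.nil_append]
        rw [pvFilterFold]
        simp [pvProc, pvAbsorbB, pvMergeA, pvFlushB]
        split_ifs <;> tauto
      | cons r rs =>
        simp only [List.cons_append]
        rw [pvFilterFold]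
        have hB : pvAbsorbB s (min ((slots.getLast!).1 + step) (24 * 60 - 1))
            (pvProc (none, []) (r :: rs)).1 (pvProc (none, []) (r :: rs)).2 =
            pvProc (none, []) ((r :: rs) ++ [(s, min ((slots.getLast!).1 + step) (24 * 60 - 1))]) := by
          rw [pvProc_append]
        have hC : pvProc (none, ([] : List (List (String × String))))
            ((r :: rs) ++ [(s, min ((slots.getLast!).1 + step) (24 * 60 - 1))]) =
            pvProc (some r, []) (rs ++ [(s, min ((slots.getLast!).1 + step) (24 * 60 - 1))]) := by
          simp [pvProc, pvAbsorbB]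
        calc (pvMergeA [] r (rs ++ [(s, min ((slots.getLast!).1 + step) (24 * 60 - 1))])).foldl
              (fun a iv => pvFlushB iv a) []
            = pvFin (pvProc (some r, []) (rs ++ [(s, min ((slots.getLast!).1 + step) (24 * 60 - 1))])) :=
              (pvCore _ _ _).symm
          _ = pvFin (pvAbsorbB s (min ((slots.getLast!).1 + step) (24 * 60 - 1))
                (pvProc (none, []) (r :: rs)).1 (pvProc (none, []) (r :: rs)).2) := by rw [hB, hC]
          _ = _ := by
              rcases h : pvAbsorbB s (min ((slots.getLast!).1 + step) (24 * 60 - 1))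
                (pvProc (none, []) (r :: rs)).1 (pvProc (none, []) (r :: rs)).2 with ⟨p, rr⟩
              cases p <;> rfl
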